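-- pv_equiv track=rewrite | github.com/licht-e-jima/atcoder | atcoder_beginner_contests/197/c.py | get
-- ===== SOURCE A (Python) =====
-- from typing import List, Tuple, Generator
--
-- def get(A: List[int]) -> Generator[int, None, None]:
--     for i in range(1, len(A)+1):
--         or_list = A[:i]
--         or_num = 0
--         for j in or_list:
--             or_num = or_num | j
--         if len(A[i:]) == 0:
--             yield or_num
--         else:
--             for o in get(A[i:]):
--                 yield or_num ^ o
-- ===== SOURCE B (Python) =====
-- def get(A):
--     # Flat bitmask enumeration of the 2^(n-1) partitions (leftmost gap = MSB,
--     # bit 0 = cut), replacing A's suffix recursion; one left-to-right pass per mask.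
--     n = len(A)
--     if n == 0:
--         return
--     for mask in range(1 << (n - 1)):
--         acc = 0
--         cur = 0
--         s = n - 2  # bit index of the gap after the current element
--         for x in A:
--             cur |= x
--             if s >= 0 and not (mask >> s) & 1:
--                 acc ^= cur
--                 cur = 0
--             s -= 1
--         yield acc ^ cur
-- ===== Notes on version B (the rewrite author's own statement) =====
-- stated objective: alternative
-- what changed: A's recursive generator over suffix slices (XOR of first-segment OR with each recursively yielded value) is replaced by a flat enumeration of the 2^(n-1) cut bitmasks (leftmost gap = most significant bit, bit 0 = cut), with one left-to-right pass per mask maintaining a running segment OR and an accumulated XOR.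
import Mathlib
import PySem

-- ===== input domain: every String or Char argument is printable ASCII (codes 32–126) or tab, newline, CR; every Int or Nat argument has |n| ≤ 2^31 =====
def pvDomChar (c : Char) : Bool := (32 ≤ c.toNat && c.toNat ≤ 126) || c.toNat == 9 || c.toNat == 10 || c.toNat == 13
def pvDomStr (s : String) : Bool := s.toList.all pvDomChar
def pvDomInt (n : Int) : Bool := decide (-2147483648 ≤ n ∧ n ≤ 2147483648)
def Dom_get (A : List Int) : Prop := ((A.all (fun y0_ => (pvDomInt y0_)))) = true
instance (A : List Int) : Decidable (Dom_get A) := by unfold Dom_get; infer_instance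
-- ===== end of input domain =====

-- B replaces A's suffix recursion over generators by a flat bitmask enumeration of the
-- 2^(n-1) partitions with one left-to-right pass per mask (objective: alternative).

-- ===== PORT A =====
-- literal port of A; the generator is materialised as the list of yielded values, the
-- recursion on the strict suffix A[i:] is realised with a fuel counter (fuel = |A| suffices).
def getFuel : Nat → List Int → List Int
  | 0, _ => []
  | fuel + 1, A =>
    (PySem.List.pyRange 1 ((A.length : Int) + 1) 1).flatMap (fun i =>
      let or_list := PySem.List.slice A none (some i)
      let or_num := or_list.foldl (fun a j => PySem.Int.bor a j) 0
      let rest := PySem.List.slice A (some i) none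
      if rest.length = 0 then [or_num]
      else (getFuel fuel rest).map (fun o => PySem.Int.bxor or_num o))

def get (A : List Int) : List Int := getFuel A.length A

-- ===== PORT B =====
-- inner pass of Source B: walk the elements keeping (acc, cur); s is the bit index of the
-- gap after the current element, a gap bit of 0 closes the running segment.
def altLoop : List Int → Int → Int → Int → Int → Int × Int
  | [], _mask, _s, acc, cur => (acc, cur)
  | x :: t, mask, s, acc, cur =>
    let cur' := PySem.Int.bor cur x
    if 0 ≤ s ∧ PySem.Int.band (mask >>> s.toNat) 1 = 0 then
      altLoop t mask (s - 1) (PySem.Int.bxor acc cur') 0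
    else
      altLoop t mask (s - 1) acc cur'

def get_alt (A : List Int) : List Int :=
  let n := A.length
  if n = 0 then []
  else
    (PySem.List.pyRange 0 ((1 : Int) <<< (n - 1)) 1).map (fun mask =>
      let p := altLoop A mask ((n : Int) - 2) 0 0
      PySem.Int.bxor p.1 p.2)

-- ===== PRECONDITION & SPEC =====
def Spec_get (A : List Int) (out : List Int) : Prop := out = get_alt A
instance (A : List Int) (out : List Int) : Decidable (Spec_get A out) := by unfold Spec_get; infer_instance

-- ===== CLAIM (what is proved, stated in full; the proofs are below) =====
def Claim_equal_get : Prop := ∀ (A : List Int), Dom_get A → Spec_get A (get A)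

-- ===== LEMMAS AND PROOFS =====

-- sign/magnitude encoding of Int, used to derive associativity of PySem.Int.bxor
def encInt (s : Bool) (p : Nat) : Int := if s then -(p : Int) - 1 else p

theorem encInt_ofNat (m : Nat) : (Int.ofNat m) = encInt false m := by
  simp [encInt]

theorem encInt_negSucc (m : Nat) : (Int.negSucc m) = encInt true m := by
  simp [encInt, Int.negSucc_eq]; ring

theorem bxor_enc (s t : Bool) (p q : Nat) :
    PySem.Int.bxor (encInt s p) (encInt t q) = encInt (xor s t) (p ^^^ q) := by
  have hp : (-(-(p : Int) - 1) - 1) = (p : Int) := by ring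
  have hq : (-(-(q : Int) - 1) - 1) = (q : Int) := by ring
  cases s <;> cases t
  · exact PySem.Int.bxor_natCast p q
  · show PySem.Int.bxor (↑p) (-(q : Int) - 1) = -↑(p ^^^ q) - 1
    simp only [PySem.Int.bxor]
    rw [if_pos (Int.natCast_nonneg p), if_neg (by omega), hq, Int.toNat_natCast, Int.toNat_natCast]
  · show PySem.Int.bxor (-(p : Int) - 1) (↑q) = -↑(p ^^^ q) - 1
    simp only [PySem.Int.bxor]
    rw [if_neg (by omega), if_pos (Int.natCast_nonneg q), hp, Int.toNat_natCast, Int.toNat_natCast]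
  · show PySem.Int.bxor (-(p : Int) - 1) (-(q : Int) - 1) = ↑(p ^^^ q)
    simp only [PySem.Int.bxor]
    rw [if_neg (by omega), if_neg (by omega), hp, hq, Int.toNat_natCast, Int.toNat_natCast]

theorem pvBxorAssoc (a b c : Int) :
    PySem.Int.bxor (PySem.Int.bxor a b) c = PySem.Int.bxor a (PySem.Int.bxor b c) := by
  rcases a with p | p <;> rcases b with q | q <;> rcases c with r | r <;>
    simp only [encInt_ofNat, encInt_negSucc, bxor_enc] <;>
    rw [Bool.xor_assoc, Nat.xor_assoc]

theorem pvZeroBxor (a : Int) : PySem.Int.bxor 0 a = a := by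
  rw [PySem.Int.bxor_comm, PySem.Int.bxor_zero]

theorem pvZeroBor (a : Int) : PySem.Int.bor 0 a = a := by
  rw [PySem.Int.bor_comm, PySem.Int.bor_zero]

-- Nat bit facts for the mask split
theorem pvBitHigh_lt (m t : Nat) (h : m < 2 ^ t) : (m >>> t) &&& 1 = 0 := by
  rw [Nat.shiftRight_eq_div_pow, Nat.div_eq_of_lt h]
  rfl

theorem pvBitHigh_add (m t : Nat) (h : m < 2 ^ t) : ((2 ^ t + m) >>> t) &&& 1 = 1 := by
  rw [Nat.shiftRight_eq_div_pow, Nat.add_comm, Nat.add_div_right _ ((Nat.pow_pos (by norm_num))),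
    Nat.div_eq_of_lt h]
  decide

theorem pvBitLow_add (m t j : Nat) (_h : m < 2 ^ t) (hj : j < t) :
    ((2 ^ t + m) >>> j) &&& 1 = (m >>> j) &&& 1 := by
  rw [Nat.shiftRight_eq_div_pow, Nat.shiftRight_eq_div_pow]
  have h1 : 2 ^ t = 2 ^ j * 2 ^ (t - j) := by
    rw [← pow_add]; congr 1; omega
  rw [h1, Nat.mul_add_div ((Nat.pow_pos (by norm_num)))]
  have h2 : 2 ^ (t - j) = 2 * 2 ^ (t - j - 1) := by
    rw [← pow_succ']; congr 1; omega
  rw [Nat.and_one_is_mod, Nat.and_one_is_mod, h2]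
  omega

-- the accumulator of altLoop only XORs values that do not depend on it
theorem altLoop_acc (xs : List Int) : ∀ (mask s a c : Int),
    altLoop xs mask s a c =
      (PySem.Int.bxor a (altLoop xs mask s 0 c).1, (altLoop xs mask s 0 c).2) := by
  induction xs with
  | nil => intro mask s a c; simp [altLoop, PySem.Int.bxor_zero]
  | cons x t ih =>
    intro mask s a c
    simp only [altLoop]
    split
    · rw [ih mask (s - 1) (PySem.Int.bxor a (PySem.Int.bor c x)) 0,
        ih mask (s - 1) (PySem.Int.bxor 0 (PySem.Int.bor c x)) 0,
        pvZeroBxor, pvBxorAssoc]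
    · rw [ih mask (s - 1) a (PySem.Int.bor c x),
        ih mask (s - 1) 0 (PySem.Int.bor c x), pvZeroBxor]

-- bits of the mask below t are unchanged by adding 2^t
theorem altLoop_highbit (xs : List Int) : ∀ (m t : Nat) (s a c : Int),
    m < 2 ^ t → s ≤ (t : Int) - 1 →
    altLoop xs ((2 ^ t + m : Nat) : Int) s a c = altLoop xs (m : Int) s a c := by
  induction xs with
  | nil => intro m t s a c _ _; simp [altLoop]
  | cons x xs ih =>
    intro m t s a c hm hs
    simp only [altLoop]
    have hcond : (0 ≤ s ∧ PySem.Int.band (((2 ^ t + m : Nat) : Int) >>> s.toNat) 1 = 0)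
        ↔ (0 ≤ s ∧ PySem.Int.band ((m : Int) >>> s.toNat) 1 = 0) := by
      constructor <;> rintro ⟨h0, hb⟩ <;> refine ⟨h0, ?_⟩ <;>
      · rw [← Int.natCast_shiftRight] at hb ⊢
        rw [show (1 : Int) = ((1 : Nat) : Int) from rfl, PySem.Int.band_natCast] at hb ⊢
        have hj : s.toNat < t := by omega
        rw [pvBitLow_add m t s.toNat hm hj] at *
        omega
    by_cases h : 0 ≤ s ∧ PySem.Int.band ((m : Int) >>> s.toNat) 1 = 0
    · rw [if_pos (hcond.mpr h), if_pos h]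
      exact ih m t (s - 1) _ _ hm (by omega)
    · rw [if_neg (fun hh => h (hcond.mp hh)), if_neg h]
      exact ih m t (s - 1) _ _ hm (by omega)

-- one-step unfolding of altLoop (used to control rewriting)
theorem altLoop_cons (x : Int) (t : List Int) (mask s acc cur : Int) :
    altLoop (x :: t) mask s acc cur =
      (if 0 ≤ s ∧ PySem.Int.band (mask >>> s.toNat) 1 = 0 then
        altLoop t mask (s - 1) (PySem.Int.bxor acc (PySem.Int.bor cur x)) 0
      else altLoop t mask (s - 1) acc (PySem.Int.bor cur x)) := rfl

-- common recursive characterisation of the yielded list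
def pvSpec : List Int → List Int
  | [] => []
  | [x] => [x]
  | x :: y :: rest =>
      ((pvSpec (y :: rest)).map (fun o => PySem.Int.bxor x o)) ++
        pvSpec (PySem.Int.bor x y :: rest)
  termination_by l => l.length
  decreasing_by all_goals simp

-- Nat-indexed unfolding of one layer of the A port
theorem getFuel_succ (f : Nat) (A : List Int) :
    getFuel (f + 1) A = (List.range A.length).flatMap (fun k =>
      let or_num := (A.take (k + 1)).foldl (fun a j => PySem.Int.bor a j) 0
      let rest := A.drop (k + 1)
      if rest.length = 0 then [or_num]
      else (getFuel f rest).map (fun o => PySem.Int.bxor or_num o)) := by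
  simp only [getFuel]
  rw [PySem.List.pyRange_one]
  have h1 : (((A.length : Int)) + 1 - 1).toNat = A.length := by omega
  rw [h1, List.flatMap_map]
  apply List.flatMap_congr
  intro k _
  have hc : (1 : Int) + ↑k = ((k + 1 : Nat) : Int) := by push_cast; ring
  simp only [hc, PySem.List.slice_to_natCast, PySem.List.slice_from_natCast]

theorem getFuel_eq_pvSpec : ∀ (n : Nat) (A : List Int), A.length = n →
    ∀ fuel, n ≤ fuel → getFuel fuel A = pvSpec A := by
  intro n
  induction n using Nat.strong_induction_on with
  | _ n ih =>
  intro A hA fuel hf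
  subst hA
  rcases A with _ | ⟨x, _ | ⟨y, rest⟩⟩
  · cases fuel with
    | zero => simp [getFuel, pvSpec]
    | succ f => rw [getFuel_succ]; simp [pvSpec]
  · obtain ⟨f, rfl⟩ : ∃ f, fuel = f + 1 := ⟨fuel - 1, by simp at hf; omega⟩
    rw [getFuel_succ]
    simp [pvSpec, pvZeroBor]
  · simp only [List.length_cons] at hf
    obtain ⟨f, rfl⟩ : ∃ f, fuel = f + 1 := ⟨fuel - 1, by omega⟩
    rw [getFuel_succ]
    simp only [List.length_cons]
    rw [List.range_succ_eq_map, List.flatMap_cons, List.flatMap_map]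
    conv_rhs => rw [pvSpec]
    congr 1
    · simp only [List.take_succ_cons, List.take_zero, List.drop_succ_cons, List.drop_zero,
        List.foldl_cons, List.foldl_nil, List.length_cons]
      rw [if_neg (by simp), ih (rest.length + 1) (by simp) (y :: rest) (by simp) f (by omega),
        pvZeroBor]
    · rw [← ih (rest.length + 1) (by simp) (PySem.Int.bor x y :: rest) (by simp) f (by omega)]
      obtain ⟨f', rfl⟩ : ∃ f', f = f' + 1 := ⟨f - 1, by omega⟩
      rw [getFuel_succ]
      simp only [List.length_cons]
      apply List.flatMap_congr
      intro k hk
      simp only [Nat.succ_eq_add_one, List.take_succ_cons, List.drop_succ_cons, List.foldl_cons]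
      rw [pvZeroBor, pvZeroBor]
      by_cases hz : (rest.drop k).length = 0
      · rw [if_pos hz, if_pos hz]
      · rw [if_neg hz, if_neg hz,
          ih (rest.drop k).length (by simp; omega) (rest.drop k) rfl (f' + 1) (by simp; omega),
          ih (rest.drop k).length (by simp; omega) (rest.drop k) rfl f' (by simp; omega)]

-- Nat-indexed unfolding of the B port
theorem get_alt_unfold (A : List Int) (h : A ≠ []) :
    get_alt A = (List.range (2 ^ (A.length - 1))).map (fun m =>
      let p := altLoop A ((m : Nat) : Int) ((A.length : Int) - 2) 0 0
      PySem.Int.bxor p.1 p.2) := by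
  unfold get_alt
  rw [if_neg (by simpa using h)]
  have h1 : (1 : Int) <<< (A.length - 1) = ((2 ^ (A.length - 1) : Nat) : Int) := by
    rw [show (1 : Int) <<< (A.length - 1) = ((1 : Nat) : Int) <<< (A.length - 1) from rfl,
      ← Int.natCast_shiftLeft, Nat.one_shiftLeft]
  rw [h1, PySem.List.pyRange_zero_nat, List.map_map]
  rfl

theorem get_alt_eq_pvSpec : ∀ (n : Nat) (A : List Int), A.length = n → get_alt A = pvSpec A := by
  intro n
  induction n using Nat.strong_induction_on with
  | _ n ih =>
  intro A hA
  subst hA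
  rcases A with _ | ⟨x, _ | ⟨y, rest⟩⟩
  · simp [get_alt, pvSpec]
  · rw [get_alt_unfold _ (by simp)]
    norm_num [List.range_one]
    simp only [altLoop]
    rw [if_neg (by norm_num)]
    simp [pvZeroBor, pvZeroBxor, pvSpec]
  · rw [get_alt_unfold _ (by simp)]
    simp only [List.length_cons]
    have hlen : rest.length + 1 + 1 - 1 = rest.length + 1 := rfl
    rw [hlen, pow_succ, mul_two, List.range_add, List.map_append, List.map_map]
    have hs : ((rest.length + 1 + 1 : Nat) : Int) - 2 = ((rest.length : Nat) : Int) := by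
      push_cast; ring
    have hs' : ((rest.length + 1 : Nat) : Int) - 2 = ((rest.length : Nat) : Int) - 1 := by
      push_cast; ring
    have hfirst : ∀ m : Nat, m < 2 ^ rest.length →
        (PySem.Int.bxor
          (altLoop (x :: y :: rest) (m : Int) (((rest.length + 1 + 1 : Nat) : Int) - 2) 0 0).1
          (altLoop (x :: y :: rest) (m : Int) (((rest.length + 1 + 1 : Nat) : Int) - 2) 0 0).2)
        = PySem.Int.bxor x
            (PySem.Int.bxor
              (altLoop (y :: rest) (m : Int) (((rest.length + 1 : Nat) : Int) - 2) 0 0).1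
              (altLoop (y :: rest) (m : Int) (((rest.length + 1 : Nat) : Int) - 2) 0 0).2) := by
      intro m hm
      rw [hs, hs']
      rw [altLoop_cons]
      rw [if_pos ⟨Int.natCast_nonneg _, by
        rw [Int.toNat_natCast, ← Int.natCast_shiftRight,
          show (1 : Int) = ((1 : Nat) : Int) from rfl, PySem.Int.band_natCast,
          pvBitHigh_lt m rest.length hm]
        rfl⟩]
      rw [pvZeroBor, pvZeroBxor]
      rw [altLoop_acc (y :: rest) (m : Int) (((rest.length : Nat) : Int) - 1) x 0]
      dsimp only
      rw [pvBxorAssoc]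
    have hsecond : ∀ m : Nat, m < 2 ^ rest.length →
        (PySem.Int.bxor
          (altLoop (x :: y :: rest) ((2 ^ rest.length + m : Nat) : Int) (((rest.length + 1 + 1 : Nat) : Int) - 2) 0 0).1
          (altLoop (x :: y :: rest) ((2 ^ rest.length + m : Nat) : Int) (((rest.length + 1 + 1 : Nat) : Int) - 2) 0 0).2)
        = (PySem.Int.bxor
            (altLoop (PySem.Int.bor x y :: rest) (m : Int) (((rest.length + 1 : Nat) : Int) - 2) 0 0).1
            (altLoop (PySem.Int.bor x y :: rest) (m : Int) (((rest.length + 1 : Nat) : Int) - 2) 0 0).2) := by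
      intro m hm
      rw [hs, hs']
      rw [altLoop_cons]
      rw [if_neg (by
        rintro ⟨_, hb⟩
        rw [Int.toNat_natCast, ← Int.natCast_shiftRight,
          show (1 : Int) = ((1 : Nat) : Int) from rfl, PySem.Int.band_natCast,
          pvBitHigh_add m rest.length hm] at hb
        exact absurd hb (by norm_num))]
      rw [altLoop_highbit (y :: rest) m rest.length _ _ _ hm (by omega)]
      have step : altLoop (y :: rest) (m : Int) (((rest.length : Nat) : Int) - 1) 0 (PySem.Int.bor 0 x)
          = altLoop (PySem.Int.bor x y :: rest) (m : Int) (((rest.length : Nat) : Int) - 1) 0 0 := by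
        rw [altLoop_cons, altLoop_cons, pvZeroBor, pvZeroBor]
      rw [step]
    have hA1 : (List.range (2 ^ rest.length)).map
        (fun (m : Nat) => let p := altLoop (x :: y :: rest) (m : Int) (((rest.length + 1 + 1 : Nat) : Int) - 2) 0 0
                          PySem.Int.bxor p.1 p.2)
        = (pvSpec (y :: rest)).map (fun o => PySem.Int.bxor x o) := by
      rw [← ih (rest.length + 1) (by simp) (y :: rest) (by simp), get_alt_unfold _ (by simp),
        List.map_map]
      simp only [List.length_cons, Nat.add_sub_cancel]
      apply List.map_congr_left
      intro m hm
      exact hfirst m (by simpa using hm)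
    have hA2 : (List.range (2 ^ rest.length)).map
        ((fun (m : Nat) => let p := altLoop (x :: y :: rest) (m : Int) (((rest.length + 1 + 1 : Nat) : Int) - 2) 0 0
                           PySem.Int.bxor p.1 p.2) ∘ (fun m => 2 ^ rest.length + m))
        = pvSpec (PySem.Int.bor x y :: rest) := by
      rw [← ih (rest.length + 1) (by simp) (PySem.Int.bor x y :: rest) (by simp),
        get_alt_unfold _ (by simp)]
      simp only [List.length_cons, Nat.add_sub_cancel]
      apply List.map_congr_left
      intro m hm
      simp only [Function.comp_apply]
      exact hsecond m (by simpa using hm)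
    rw [hA1, hA2]
    conv_rhs => rw [pvSpec]

-- ===== VERDICT (by name: the statement is the Claim_ definition above) =====
theorem get_spec : Claim_equal_get := by
  intro A _
  unfold Spec_get _root_.get
  rw [getFuel_eq_pvSpec A.length A rfl A.length le_rfl, get_alt_eq_pvSpec A.length A rfl]
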